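-- pv_equiv track=rewrite | github.com/tlhpaul/Python-Project | Squarelotron/Squarelotron.py | left_right_flip
-- ===== SOURCE A (Python) =====
-- import copy
--
-- def left_right_flip(squarelotron, ring):
--     """This function performs the Left-Right Flip of the squarelotron, as described above, and returns the
--     new squarelotron. The original squarelotron should not be modified (I will check for this).
--     Calling this function should not result in any input/output."""
--     new_squarelotron = copy.deepcopy(squarelotron)
--     if ring == "outer":
--         for i in range(0, 5):
--             new_squarelotron[i][0], new_squarelotron[i][4] = new_squarelotron[i][4], new_squarelotron[i][0]
--         new_squarelotron[0][1], new_squarelotron[0][3] = new_squarelotron[0][3], new_squarelotron[0][1]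
--         new_squarelotron[4][1], new_squarelotron[4][3] = new_squarelotron[4][3], new_squarelotron[4][1]
--
--     elif ring == "inner":
--         for i in range(1, 4):
--             new_squarelotron[i][1], new_squarelotron[i][3] = new_squarelotron[i][3], new_squarelotron[i][1]
--
--     return new_squarelotron
-- ===== SOURCE B (Python) =====
-- import copy
--
-- def left_right_flip(squarelotron, ring):
--     """Left-right flip of the requested ring; source-to-destination mapping
--     new[i][j] = squarelotron[i][4-j] over one ring-membership predicate."""
--     new_squarelotron = copy.deepcopy(squarelotron)
--     if ring == "outer":
--         member = lambda i, j: i in (0, 4) or j in (0, 4)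
--     elif ring == "inner":
--         member = lambda i, j: 1 <= i <= 3 and 1 <= j <= 3 and (i, j) != (2, 2)
--     else:
--         return new_squarelotron
--     for i in range(5):
--         for j in range(5):
--             if member(i, j):
--                 new_squarelotron[i][j] = squarelotron[i][4 - j]
--     return new_squarelotron
-- ===== Notes on version B (the rewrite author's own statement) =====
-- stated objective: simpler
-- what changed: Replaces the hard-coded list of pairwise in-place swaps with one ring-membership predicate and a uniform source-to-destination mapping new[i][j] = squarelotron[i][4-j] over a double loop on the 5x5 coordinates; Pre_ only excludes grids smaller than the ring needs, on which A raises IndexError (B raises there too).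
import Mathlib
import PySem

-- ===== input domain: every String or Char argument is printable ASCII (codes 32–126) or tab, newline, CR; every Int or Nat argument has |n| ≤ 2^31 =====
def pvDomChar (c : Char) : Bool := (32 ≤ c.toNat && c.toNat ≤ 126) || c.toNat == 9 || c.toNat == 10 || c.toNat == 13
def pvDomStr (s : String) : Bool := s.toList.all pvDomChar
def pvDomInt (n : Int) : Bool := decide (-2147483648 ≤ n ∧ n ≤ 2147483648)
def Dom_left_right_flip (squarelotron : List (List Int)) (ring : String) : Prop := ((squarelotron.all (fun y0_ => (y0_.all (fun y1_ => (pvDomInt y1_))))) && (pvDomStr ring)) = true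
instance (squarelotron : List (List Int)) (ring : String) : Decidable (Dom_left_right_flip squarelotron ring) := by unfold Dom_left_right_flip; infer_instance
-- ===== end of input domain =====

-- B replaces A's hard-coded pairwise swaps by one ring-membership predicate with the
-- uniform mapping new[i][j] = squarelotron[i][4-j] (objective: simpler).

-- ===== PORT A =====
-- Python's simultaneous swap m[i][a], m[i][b] = m[i][b], m[i][a]; indices are in range under Pre_.
def pvSwap (m : List (List Int)) (i a b : Nat) : List (List Int) :=
  let row := m.getD i []
  m.set i ((row.set a (row.getD b 0)).set b (row.getD a 0))

def left_right_flip (squarelotron : List (List Int)) (ring : String) : List (List Int) :=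
  if ring = "outer" then
    let n1 := (PySem.List.pyRange 0 5 1).foldl (fun m i => pvSwap m i.toNat 0 4) squarelotron
    let n2 := pvSwap n1 0 1 3
    pvSwap n2 4 1 3
  else if ring = "inner" then
    (PySem.List.pyRange 1 4 1).foldl (fun m i => pvSwap m i.toNat 1 3) squarelotron
  else squarelotron

-- ===== PORT B =====
def pvGetCell (s : List (List Int)) (i j : Nat) : Int := (s.getD i []).getD j 0
def pvSetCell (m : List (List Int)) (i j : Nat) (v : Int) : List (List Int) :=
  m.set i ((m.getD i []).set j v)
def pvMember (ring : String) (i j : Nat) : Bool :=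
  if ring = "outer" then decide (i = 0 ∨ i = 4 ∨ j = 0 ∨ j = 4)
  else decide (1 ≤ i ∧ i ≤ 3 ∧ 1 ≤ j ∧ j ≤ 3 ∧ ¬(i = 2 ∧ j = 2))

def left_right_flip_alt (squarelotron : List (List Int)) (ring : String) : List (List Int) :=
  if ring = "outer" ∨ ring = "inner" then
    (List.range 5).foldl (fun m i =>
      (List.range 5).foldl (fun m' j =>
        if pvMember ring i j then pvSetCell m' i j (pvGetCell squarelotron i (4 - j)) else m') m)
      squarelotron
  else squarelotron

-- ===== PRECONDITION & SPEC =====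
-- Pre_ excludes exactly the inputs on which A raises IndexError: for ring "outer" grids
-- with fewer than 5 rows or one of rows 0..4 shorter than 5; for ring "inner" grids with
-- fewer than 4 rows or one of rows 1..3 shorter than 4. B raises there as well.
def Pre_left_right_flip (squarelotron : List (List Int)) (ring : String) : Prop :=
  (ring = "outer" →
    5 ≤ squarelotron.length ∧
    5 ≤ (squarelotron.getD 0 []).length ∧ 5 ≤ (squarelotron.getD 1 []).length ∧
    5 ≤ (squarelotron.getD 2 []).length ∧ 5 ≤ (squarelotron.getD 3 []).length ∧
    5 ≤ (squarelotron.getD 4 []).length) ∧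
  (ring = "inner" →
    4 ≤ squarelotron.length ∧
    4 ≤ (squarelotron.getD 1 []).length ∧ 4 ≤ (squarelotron.getD 2 []).length ∧
    4 ≤ (squarelotron.getD 3 []).length)
instance (squarelotron : List (List Int)) (ring : String) : Decidable (Pre_left_right_flip squarelotron ring) := by unfold Pre_left_right_flip; infer_instance

def pvWitness_left_right_flip : List (List Int) × String :=
  ([[1,2,3,4,5],[6,7,8,9,10],[11,12,13,14,15],[16,17,18,19,20],[21,22,23,24,25]], "outer")

def Spec_left_right_flip (squarelotron : List (List Int)) (ring : String) (out : List (List Int)) : Prop := out = left_right_flip_alt squarelotron ring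
instance (squarelotron : List (List Int)) (ring : String) (out : List (List Int)) : Decidable (Spec_left_right_flip squarelotron ring out) := by unfold Spec_left_right_flip; infer_instance

-- ===== CLAIM (what is proved, stated in full; the proofs are below) =====
def Claim_equal_left_right_flip : Prop := ∀ (squarelotron : List (List Int)) (ring : String), Dom_left_right_flip squarelotron ring → Pre_left_right_flip squarelotron ring → Spec_left_right_flip squarelotron ring (left_right_flip squarelotron ring)

-- ===== LEMMAS AND PROOFS =====

theorem pvExists5 {α : Type} (l : List α) (h : 5 ≤ l.length) :
    ∃ a b c d e t, l = a :: b :: c :: d :: e :: t := by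
  rcases l with _ | ⟨a, _ | ⟨b, _ | ⟨c, _ | ⟨d, _ | ⟨e, t⟩⟩⟩⟩⟩ <;>
    first
      | exact ⟨_, _, _, _, _, _, rfl⟩
      | (simp at h)

theorem pvExists4 {α : Type} (l : List α) (h : 4 ≤ l.length) :
    ∃ a b c d t, l = a :: b :: c :: d :: t := by
  rcases l with _ | ⟨a, _ | ⟨b, _ | ⟨c, _ | ⟨d, t⟩⟩⟩⟩ <;>
    first
      | exact ⟨_, _, _, _, _, rfl⟩
      | (simp at h)

-- ===== VERDICT (by name: the statement is the Claim_ definition above) =====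
theorem left_right_flip_spec : Claim_equal_left_right_flip := by
  intro s ring _dom pre
  unfold Spec_left_right_flip
  by_cases ho : ring = "outer"
  · subst ho
    obtain ⟨h5, h0, h1, h2, h3, h4⟩ := pre.1 rfl
    obtain ⟨r0, r1, r2, r3, r4, rest, rfl⟩ := pvExists5 s h5
    obtain ⟨a0, a1, a2, a3, a4, t0, rfl⟩ := pvExists5 r0 (by simpa using h0)
    obtain ⟨b0, b1, b2, b3, b4, t1, rfl⟩ := pvExists5 r1 (by simpa using h1)
    obtain ⟨c0, c1, c2, c3, c4, t2, rfl⟩ := pvExists5 r2 (by simpa using h2)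
    obtain ⟨d0, d1, d2, d3, d4, t3, rfl⟩ := pvExists5 r3 (by simpa using h3)
    obtain ⟨e0, e1, e2, e3, e4, t4, rfl⟩ := pvExists5 r4 (by simpa using h4)
    have hr : PySem.List.pyRange 0 5 1 = [0, 1, 2, 3, 4] := by decide
    simp [left_right_flip, left_right_flip_alt, hr, pvSwap, pvSetCell, pvGetCell, pvMember,
      List.range_succ]
  · by_cases hi : ring = "inner"
    · subst hi
      obtain ⟨h4, h1, h2, h3⟩ := pre.2 rfl
      obtain ⟨r0, r1, r2, r3, rest, rfl⟩ := pvExists4 s h4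
      obtain ⟨b0, b1, b2, b3, t1, rfl⟩ := pvExists4 r1 (by simpa using h1)
      obtain ⟨c0, c1, c2, c3, t2, rfl⟩ := pvExists4 r2 (by simpa using h2)
      obtain ⟨d0, d1, d2, d3, t3, rfl⟩ := pvExists4 r3 (by simpa using h3)
      have hr : PySem.List.pyRange 1 4 1 = [1, 2, 3] := by decide
      simp [left_right_flip, left_right_flip_alt, hr, pvSwap, pvSetCell, pvGetCell, pvMember,
        List.range_succ]
    · simp [left_right_flip, left_right_flip_alt, ho, hi]
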